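-- pv_equiv track=rewrite | github.com/cutlersr/iggypop | iggypop/gagga_MC.py | filter_reverse_complements
-- ===== SOURCE A (Python) =====
-- def reverse_complement(sequence):
--     """Return the reverse complement of a DNA sequence."""
--     complement = {'A': 'T', 'T': 'A', 'C': 'G', 'G': 'C'}
--     return "".join(complement[base] for base in reversed(sequence))
--
-- def filter_reverse_complements(sequences):
--     """
--     From a list of sequences, keep only one of each reverse‑complement pair
--     to avoid redundant scoring.
--     """
--     final = []
--     seen = set()
--     for seq in sequences:
--         rc = reverse_complement(seq)
--         if seq not in seen and rc not in seen:
--             final.append(seq)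
--             seen.add(seq)
--     return final
-- ===== SOURCE B (Python) =====
-- def reverse_complement(sequence):
--     """Return the reverse complement of a DNA sequence."""
--     complement = {'A': 'T', 'T': 'A', 'C': 'G', 'G': 'C'}
--     return "".join(complement[base] for base in reversed(sequence))
--
-- def filter_reverse_complements(sequences):
--     # Sieve: take the head of the remaining list, keep it, then filter every
--     # later occurrence of it or of its reverse complement out of the rest;
--     # repeat until nothing remains.  No seen-set is maintained at all.
--     final = []
--     remaining = list(sequences)
--     while remaining:
--         s = remaining[0]
--         rc = reverse_complement(s)
--         final.append(s)
--         remaining = [t for t in remaining[1:] if t != s and t != rc]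
--     return final
-- ===== Notes on version B (the rewrite author's own statement) =====
-- stated objective: alternative
-- what changed: Replaces A's single pass with a seen-set and two membership tests per element by a sieve: repeatedly keep the head of the remaining list and filter it and its reverse complement out of the rest, with no auxiliary set at all.
import Mathlib
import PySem

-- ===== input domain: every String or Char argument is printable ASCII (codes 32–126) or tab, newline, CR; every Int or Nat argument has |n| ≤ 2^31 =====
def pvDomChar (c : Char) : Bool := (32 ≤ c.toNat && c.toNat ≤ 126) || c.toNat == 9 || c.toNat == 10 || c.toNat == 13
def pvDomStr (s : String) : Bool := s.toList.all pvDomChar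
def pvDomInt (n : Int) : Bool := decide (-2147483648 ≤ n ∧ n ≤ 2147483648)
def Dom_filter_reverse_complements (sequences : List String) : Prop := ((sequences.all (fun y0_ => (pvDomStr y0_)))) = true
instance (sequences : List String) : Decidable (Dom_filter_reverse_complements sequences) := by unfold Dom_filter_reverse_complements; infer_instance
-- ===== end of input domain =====

-- B replaces A's seen-set single pass by a sieve with no auxiliary set: keep the
-- head of the remaining list, filter it and its reverse complement out of the
-- rest, repeat; objective: alternative (same result, different traversal).

-- ===== PORT A =====
-- complement dict lookup: none exactly where Python raises KeyError
def pvComplementChar? (c : Char) : Option Char :=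
  if c = 'A' then some 'T'
  else if c = 'T' then some 'A'
  else if c = 'C' then some 'G'
  else if c = 'G' then some 'C'
  else none

def reverse_complement? (sequence : String) : Option String :=
  (sequence.toList.reverse.mapM pvComplementChar?).map String.ofList

def filter_reverse_complements (sequences : List String) : List String :=
  (sequences.foldl (fun (st : List String × PySem.Set String) seq =>
      match reverse_complement? seq with
      | none => st  -- Python raises KeyError here; excluded by Pre_
      | some rc =>
        if !(PySem.Set.contains st.2 seq) && !(PySem.Set.contains st.2 rc) then
          (st.1 ++ [seq], PySem.Set.add st.2 seq)
        else st)
    ([], PySem.Set.empty)).1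

-- ===== PORT B =====
-- the while loop of Source B: state (final, remaining), remaining shrinks each turn
def pvSieveLoop (final remaining : List String) : List String :=
  match remaining with
  | [] => final
  | s :: rest =>
    match reverse_complement? s with
    | none => final  -- Python raises KeyError here; excluded by Pre_
    | some rc => pvSieveLoop (final ++ [s]) (rest.filter (fun t => t != s && t != rc))
termination_by remaining.length
decreasing_by
  simp only [List.length_unattach, List.length_cons]
  exact Nat.lt_succ_of_le (le_trans (List.length_filter_le _ _) (by simp))

def filter_reverse_complements_alt (sequences : List String) : List String :=
  pvSieveLoop [] sequences

-- ===== PRECONDITION & SPEC =====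
-- Pre_ excludes sequences containing a character outside 'ATCG': there A's
-- reverse_complement raises KeyError (B raises identically).
def Pre_filter_reverse_complements (sequences : List String) : Prop :=
  (sequences.all fun s => s.toList.all fun c => c == 'A' || c == 'T' || c == 'C' || c == 'G') = true
instance (sequences : List String) : Decidable (Pre_filter_reverse_complements sequences) := by
  unfold Pre_filter_reverse_complements; infer_instance

def pvWitness_filter_reverse_complements : List String := ["AC", "GT", "AC", "", "CGAT"]

def Spec_filter_reverse_complements (sequences : List String) (out : List String) : Prop := out = filter_reverse_complements_alt sequences
instance (sequences : List String) (out : List String) : Decidable (Spec_filter_reverse_complements sequences out) := by unfold Spec_filter_reverse_complements; infer_instance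

-- ===== CLAIM (what is proved, stated in full; the proofs are below) =====
def Claim_equal_filter_reverse_complements : Prop := ∀ (sequences : List String), Dom_filter_reverse_complements sequences → Pre_filter_reverse_complements sequences → Spec_filter_reverse_complements sequences (filter_reverse_complements sequences)

-- ===== LEMMAS AND PROOFS =====

-- total complement on valid chars (identity elsewhere; an involution everywhere)
def pvRcC (c : Char) : Char :=
  if c = 'A' then 'T' else if c = 'T' then 'A'
  else if c = 'C' then 'G' else if c = 'G' then 'C' else c

def pvRcS (s : String) : String := String.ofList (s.toList.reverse.map pvRcC)

def pvValid (s : String) : Prop := ∀ c ∈ s.toList, c = 'A' ∨ c = 'T' ∨ c = 'C' ∨ c = 'G'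

lemma pvRcC_invol (c : Char) : pvRcC (pvRcC c) = c := by
  unfold pvRcC; split_ifs <;> simp_all

lemma pvMapM_valid (l : List Char) (h : ∀ c ∈ l, c = 'A' ∨ c = 'T' ∨ c = 'C' ∨ c = 'G') :
    l.mapM pvComplementChar? = some (l.map pvRcC) := by
  induction l with
  | nil => rfl
  | cons c t ih =>
    have hc : pvComplementChar? c = some (pvRcC c) := by
      rcases h c (List.mem_cons_self ..) with h' | h' | h' | h' <;> subst h' <;> rfl
    rw [List.mapM_cons, hc, ih (fun x hx => h x (List.mem_cons_of_mem _ hx))]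
    rfl

lemma pvRc?_eq (s : String) (h : pvValid s) :
    reverse_complement? s = some (pvRcS s) := by
  unfold reverse_complement? pvRcS
  rw [pvMapM_valid _ (fun c hc => h c (List.mem_reverse.mp hc))]
  rfl

lemma pvRcS_invol (s : String) : pvRcS (pvRcS s) = s := by
  unfold pvRcS
  have h : pvRcC ∘ pvRcC = id := funext pvRcC_invol
  rw [String.toList_ofList, List.map_reverse, List.map_map, h, List.map_id,
    List.reverse_reverse, String.ofList_toList]

-- the sieve's survival test for one kept element, as A sees it through the seen-set
def pvP (F : List String) (t : String) : Bool :=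
  !(decide (t ∈ F)) && !(decide (pvRcS t ∈ F))

lemma pvP_append (F : List String) (s t : String) :
    pvP (F ++ [s]) t = (pvP F t && (t != s && t != pvRcS s)) := by
  unfold pvP
  have h1 : pvRcS t = s ↔ t = pvRcS s := by
    constructor
    · rintro rfl; rw [pvRcS_invol]
    · rintro rfl; rw [pvRcS_invol]
  by_cases h2 : t ∈ F <;> by_cases h3 : pvRcS t ∈ F <;>
    by_cases h4 : t = s <;> by_cases h5 : t = pvRcS s <;>
      simp [h1, h2, h3, h4, h5, pvRcS_invol]

-- main invariant: A's fold from kept list F equals B's sieve on the survivors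
lemma pvLoop (l : List String) (F : List String) (hv : ∀ s ∈ l, pvValid s) :
    (l.foldl (fun (st : List String × PySem.Set String) seq =>
      match reverse_complement? seq with
      | none => st
      | some rc =>
        if !(PySem.Set.contains st.2 seq) && !(PySem.Set.contains st.2 rc) then
          (st.1 ++ [seq], PySem.Set.add st.2 seq)
        else st) (F, PySem.Set.ofList F)).1
    = pvSieveLoop F (l.filter (pvP F)) := by
  induction l generalizing F with
  | nil => simp [pvSieveLoop]
  | cons seq l ih =>
    have hseq := hv seq (List.mem_cons_self ..)
    have hv' : ∀ s ∈ l, pvValid s := fun s hs => hv s (List.mem_cons_of_mem _ hs)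
    simp only [List.foldl_cons, List.filter_cons, pvRc?_eq seq hseq]
    have hcond : (!(PySem.Set.contains (PySem.Set.ofList F) seq)
        && !(PySem.Set.contains (PySem.Set.ofList F) (pvRcS seq))) = pvP F seq := by
      unfold pvP
      by_cases h1 : seq ∈ F <;> by_cases h2 : pvRcS seq ∈ F <;>
        simp [h1, h2, PySem.Set.mem_ofList]
    rw [hcond]
    by_cases hp : pvP F seq = true
    · have hfe : l.filter (pvP (F ++ [seq]))
          = (l.filter (pvP F)).filter (fun t => t != seq && t != pvRcS seq) := by
        rw [List.filter_filter]
        exact List.filter_congr (fun t _ => by rw [pvP_append F seq t, Bool.and_comm])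
      rw [if_pos hp, if_pos hp, ← PySem.Set.ofList_append_singleton,
        ih (F ++ [seq]) hv', hfe]
      simp [pvSieveLoop, pvRc?_eq seq hseq]
    · rw [if_neg (by simp_all), if_neg (by simp_all)]
      exact ih F hv'

-- ===== VERDICT (by name: the statement is the Claim_ definition above) =====
theorem filter_reverse_complements_spec : Claim_equal_filter_reverse_complements := by
  intro sequences _ hpre
  unfold Pre_filter_reverse_complements at hpre
  simp only [List.all_eq_true, Bool.or_eq_true, beq_iff_eq] at hpre
  unfold Spec_filter_reverse_complements filter_reverse_complements filter_reverse_complements_alt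
  have hv : ∀ s ∈ sequences, pvValid s := fun s hs c hc => by have := hpre s hs c hc; tauto
  rw [show (PySem.Set.empty : PySem.Set String) = PySem.Set.ofList [] from rfl,
    pvLoop sequences [] hv]
  congr 1
  exact List.filter_eq_self.mpr (fun t _ => by simp [pvP])
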